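-- pv_equiv track=rewrite | github.com/EwigMidori/space-elevator | src/space_elevator/template/_pm/scripts/propeller.py | shorten_ref
-- ===== SOURCE A (Python) =====
-- def shorten_ref(refname: str) -> str:
--     prefixes = (
--         "refs/heads/",
--         "refs/remotes/",
--         "refs/tags/",
--     )
--     for prefix in prefixes:
--         if refname.startswith(prefix):
--             return refname[len(prefix) :]
--     return refname
-- ===== SOURCE B (Python) =====
-- def shorten_ref(refname: str) -> str:
--     parts = refname.split("/", 2)
--     if len(parts) == 3 and parts[0] == "refs" and parts[1] in ("heads", "remotes", "tags"):
--         return parts[2]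
--     return refname
-- ===== Notes on version B (the rewrite author's own statement) =====
-- stated objective: idiomatic
-- what changed: Replaces the loop over three literal prefixes with startswith/slicing by a single split('/', 2) followed by a check of the first two path components, returning the third piece.
import Mathlib
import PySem

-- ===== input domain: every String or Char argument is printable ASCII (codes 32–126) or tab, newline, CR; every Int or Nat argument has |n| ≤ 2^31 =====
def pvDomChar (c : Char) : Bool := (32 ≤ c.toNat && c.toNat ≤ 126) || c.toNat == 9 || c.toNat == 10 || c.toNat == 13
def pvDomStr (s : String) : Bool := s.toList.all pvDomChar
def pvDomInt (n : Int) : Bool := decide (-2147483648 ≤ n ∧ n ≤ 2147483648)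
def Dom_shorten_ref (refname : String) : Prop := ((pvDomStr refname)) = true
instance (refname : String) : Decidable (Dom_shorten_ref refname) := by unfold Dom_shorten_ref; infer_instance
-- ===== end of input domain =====

-- B replaces A's loop over three literal prefixes (startswith + slicing) by a single
-- split('/', 2) and a check of the first two path components (objective: idiomatic).

-- ===== PORT A =====
-- the 'for prefix in prefixes' loop with its early return
def shorten_ref.loop (refname : String) : List String → String
  | [] => refname
  | p :: ps =>
      if PySem.Str.startswith refname p then
        PySem.Str.slice refname (some (PySem.Str.len p)) none
      else shorten_ref.loop refname ps

def shorten_ref (refname : String) : String :=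
  shorten_ref.loop refname ["refs/heads/", "refs/remotes/", "refs/tags/"]

-- ===== PORT B =====
def shorten_ref_alt (refname : String) : String :=
  -- parts = refname.split("/", 2); sep "/" is non-empty, so splitMax? is always `some`
  match (PySem.Str.splitMax? refname "/" 2).getD [] with
  | [a, b, c] =>
      -- len(parts) == 3 and parts[0] == "refs" and parts[1] in ("heads", "remotes", "tags")
      if a == "refs" && (b == "heads" || b == "remotes" || b == "tags") then c
      else refname
  | _ => refname

-- ===== PRECONDITION & SPEC =====
def Spec_shorten_ref (refname : String) (out : String) : Prop := out = shorten_ref_alt refname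
instance (refname : String) (out : String) : Decidable (Spec_shorten_ref refname out) := by unfold Spec_shorten_ref; infer_instance

-- ===== CLAIM (what is proved, stated in full; the proofs are below) =====
def Claim_equal_shorten_ref : Prop := ∀ (refname : String), Dom_shorten_ref refname → Spec_shorten_ref refname (shorten_ref refname)

-- ===== LEMMAS AND PROOFS =====

-- Reference shape of Python's s.split('/', m): first argument counts the splits still allowed,
-- second accumulates the current chunk (already in order).
def pvSplit : Nat → List Char → List Char → List (List Char)
  | _, pre, [] => [pre]
  | 0, pre, l => [pre ++ l]
  | m+1, pre, c :: t => if c = '/' then pre :: pvSplit m [] t else pvSplit (m+1) (pre ++ [c]) t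

theorem pvSplit_zero (pre l : List Char) : pvSplit 0 pre l = [pre ++ l] := by
  cases l <;> simp [pvSplit]

theorem pvSplit_seg (seg : List Char) (m : Nat) (pre t : List Char) (h : '/' ∉ seg) :
    pvSplit (m+1) pre (seg ++ '/' :: t) = (pre ++ seg) :: pvSplit m [] t := by
  induction seg generalizing pre with
  | nil => simp [pvSplit]
  | cons c cs ih =>
      have hc : c ≠ '/' := fun hc => h (by simp [hc])
      have hcs : '/' ∉ cs := fun hm => h (by simp [hm])
      simp [pvSplit, hc, ih (pre ++ [c]) hcs]

theorem pvSplit_inv {l : List Char} {m : Nat} {pre a : List Char} {rest : List (List Char)}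
    (h : pvSplit (m+1) pre l = a :: rest) (hne : rest ≠ []) :
    ∃ s t, l = s ++ '/' :: t ∧ a = pre ++ s ∧ pvSplit m [] t = rest := by
  induction l generalizing pre with
  | nil =>
      simp [pvSplit] at h
      exact absurd h.2 hne
  | cons c t ih =>
      by_cases hc : c = '/'
      · subst hc
        simp [pvSplit] at h
        exact ⟨[], t, rfl, by simp [h.1], h.2⟩
      · simp [pvSplit, hc] at h
        obtain ⟨s, t', h1, h2, h3⟩ := ih h
        exact ⟨c :: s, t', by simp [h1], by simp [h2], h3⟩

theorem go_spec (fuel : Nat) : ∀ (m : Nat) (l cur : List Char) (acc : List (List Char)),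
    l.length ≤ fuel →
    PySem.Chars.splitOnMax.go ['/'] fuel m l cur acc = acc.reverse ++ pvSplit m cur.reverse l := by
  induction fuel with
  | zero =>
      intro m l cur acc hl
      have : l = [] := List.length_eq_zero_iff.mp (Nat.le_zero.mp hl)
      subst this
      simp [PySem.Chars.splitOnMax.go, pvSplit]
  | succ fuel ih =>
      intro m l cur acc hl
      cases l with
      | nil => simp [PySem.Chars.splitOnMax.go, pvSplit]
      | cons c rest =>
          cases m with
          | zero =>
              simp [PySem.Chars.splitOnMax.go, pvSplit_zero]
          | succ m =>
              by_cases hc : c = '/'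
              · subst hc
                have hpre : ['/'].isPrefixOf ('/' :: rest) = true := by simp
                simp only [PySem.Chars.splitOnMax.go, hpre, if_true, Nat.succ_sub_one,
                  List.length_singleton, List.drop_one, List.tail_cons]
                rw [ih m rest [] ((cur.reverse) :: acc) (by simpa using Nat.lt_succ_iff.mp (by simpa using hl))]
                simp [pvSplit]
              · have hpre : ['/'].isPrefixOf (c :: rest) = false := by
                  simp [List.isPrefixOf]
                  exact fun h => hc h.symm
                simp only [PySem.Chars.splitOnMax.go, hpre, Bool.false_eq_true, if_false,
                  Nat.add_eq_zero_iff, reduceCtorEq, and_false]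
                rw [ih (m+1) rest (c :: cur) acc (by simpa using Nat.lt_succ_iff.mp (by simpa using hl))]
                simp [pvSplit, hc]

theorem splitOnMax_eq (cs : List Char) :
    PySem.Chars.splitOnMax cs ['/'] 2 = pvSplit 2 [] cs := by
  have h2 : ¬ ((2 : Int) < 0) := by norm_num
  simp only [PySem.Chars.splitOnMax, h2, if_false]
  have := go_spec (cs.length + 1) ((2:Int)).toNat cs [] [] (by omega)
  simpa using this

-- B's value, pushed down to pvSplit
theorem alt_eq (refname : String) :
    shorten_ref_alt refname =
      (match (pvSplit 2 [] refname.toList).map String.ofList with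
       | [a, b, c] =>
           if a == "refs" && (b == "heads" || b == "remotes" || b == "tags") then c
           else refname
       | _ => refname) := by
  unfold shorten_ref_alt
  simp [PySem.Str.splitMax?, PySem.Chars.splitMax?, splitOnMax_eq]

theorem startswith_case (refname : String) {p : String} {t : List Char}
    (hsplit : refname.toList = p.toList ++ t) (hlen : p.toList.length = (PySem.Str.len p).toNat)
    (hnn : 0 ≤ PySem.Str.len p) :
    PySem.Str.slice refname (some (PySem.Str.len p)) none = String.ofList t := by
  apply String.toList_inj.mp
  rw [PySem.Str.toList_slice, String.toList_ofList]
  show PySem.List.slice refname.toList (some (PySem.Str.len p)) none = t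
  rw [PySem.List.slice_from _ hnn, hsplit, ← hlen, List.drop_left]

theorem main_eq (refname : String) : shorten_ref refname = shorten_ref_alt refname := by
  rw [alt_eq]
  simp only [shorten_ref, shorten_ref.loop]
  by_cases h1 : PySem.Str.startswith refname "refs/heads/" = true
  · -- refname = "refs/heads/" ++ t
    obtain ⟨t, ht⟩ : "refs/heads/".toList <+: refname.toList := by
      rw [PySem.Str.startswith_eq, PySem.Chars.startswith_iff] at h1; exact h1
    have hcs : refname.toList = "refs".toList ++ '/' :: ("heads".toList ++ '/' :: t) := by
      rw [← ht]; rfl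
    have hps : pvSplit 2 [] refname.toList = ["refs".toList, "heads".toList, t] := by
      rw [hcs, pvSplit_seg _ 1 [] _ (by decide), pvSplit_seg _ 0 [] _ (by decide), pvSplit_zero]
      simp
    rw [h1, if_pos rfl, hps]
    simp only [List.map_cons, List.map_nil, String.ofList_toList]
    rw [if_pos (by decide)]
    exact startswith_case refname (by rw [← ht]) (by decide) (by decide)
  · by_cases h2 : PySem.Str.startswith refname "refs/remotes/" = true
    · obtain ⟨t, ht⟩ : "refs/remotes/".toList <+: refname.toList := by
        rw [PySem.Str.startswith_eq, PySem.Chars.startswith_iff] at h2; exact h2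
      have hcs : refname.toList = "refs".toList ++ '/' :: ("remotes".toList ++ '/' :: t) := by
        rw [← ht]; rfl
      have hps : pvSplit 2 [] refname.toList = ["refs".toList, "remotes".toList, t] := by
        rw [hcs, pvSplit_seg _ 1 [] _ (by decide), pvSplit_seg _ 0 [] _ (by decide), pvSplit_zero]
        simp
      rw [eq_false_of_ne_true h1, if_neg Bool.false_ne_true, h2, if_pos rfl, hps]
      simp only [List.map_cons, List.map_nil, String.ofList_toList]
      rw [if_pos (by decide)]
      exact startswith_case refname (by rw [← ht]) (by decide) (by decide)
    · by_cases h3 : PySem.Str.startswith refname "refs/tags/" = true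
      · obtain ⟨t, ht⟩ : "refs/tags/".toList <+: refname.toList := by
          rw [PySem.Str.startswith_eq, PySem.Chars.startswith_iff] at h3; exact h3
        have hcs : refname.toList = "refs".toList ++ '/' :: ("tags".toList ++ '/' :: t) := by
          rw [← ht]; rfl
        have hps : pvSplit 2 [] refname.toList = ["refs".toList, "tags".toList, t] := by
          rw [hcs, pvSplit_seg _ 1 [] _ (by decide), pvSplit_seg _ 0 [] _ (by decide), pvSplit_zero]
          simp
        rw [eq_false_of_ne_true h1, if_neg Bool.false_ne_true,
          eq_false_of_ne_true h2, if_neg Bool.false_ne_true, h3, if_pos rfl, hps]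
        simp only [List.map_cons, List.map_nil, String.ofList_toList]
        rw [if_pos (by decide)]
        exact startswith_case refname (by rw [← ht]) (by decide) (by decide)
      · -- no prefix matches: B's guard cannot fire either
        rw [eq_false_of_ne_true h1, if_neg Bool.false_ne_true,
          eq_false_of_ne_true h2, if_neg Bool.false_ne_true,
          eq_false_of_ne_true h3, if_neg Bool.false_ne_true]
        rcases hM : pvSplit 2 [] refname.toList with _ | ⟨la, _ | ⟨lb, _ | ⟨lc, _ | _⟩⟩⟩ <;>
          simp only [List.map_cons, List.map_nil]
        -- the [la, lb, lc] branch
        by_cases hg : (String.ofList la == "refs" &&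
            (String.ofList lb == "heads" || String.ofList lb == "remotes" ||
             String.ofList lb == "tags")) = true
        · exfalso
          obtain ⟨s, t, hl, ha, hrest⟩ := pvSplit_inv hM (by simp)
          obtain ⟨s2, t2, hl2, hb, hrest2⟩ := pvSplit_inv hrest (by simp)
          rw [pvSplit_zero] at hrest2
          simp only [List.nil_append] at ha hb
          have hc : lc = t2 := by simpa using hrest2.symm
          simp only [Bool.and_eq_true, Bool.or_eq_true, beq_iff_eq] at hg
          have hla : la = "refs".toList := by
            rw [← hg.1, String.toList_ofList]
          have hcs : refname.toList = la ++ '/' :: (lb ++ '/' :: lc) := by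
            rw [hl, hl2, ha, hb, hc]
          rcases hg.2 with (hb' | hb') | hb'
          · apply h1
            rw [PySem.Str.startswith_eq, PySem.Chars.startswith_iff]
            refine ⟨lc, ?_⟩
            have hlb : lb = "heads".toList := by
              rw [← hb', String.toList_ofList]
            rw [hcs, hla, hlb]; rfl
          · apply h2
            rw [PySem.Str.startswith_eq, PySem.Chars.startswith_iff]
            refine ⟨lc, ?_⟩
            have hlb : lb = "remotes".toList := by
              rw [← hb', String.toList_ofList]
            rw [hcs, hla, hlb]; rfl
          · apply h3
            rw [PySem.Str.startswith_eq, PySem.Chars.startswith_iff]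
            refine ⟨lc, ?_⟩
            have hlb : lb = "tags".toList := by
              rw [← hb', String.toList_ofList]
            rw [hcs, hla, hlb]; rfl
        · rw [if_neg (by simpa using hg)]

-- ===== VERDICT (by name: the statement is the Claim_ definition above) =====
theorem shorten_ref_spec : Claim_equal_shorten_ref := by
  intro refname _
  exact main_eq refname
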